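-- pv_equiv track=rewrite | github.com/daniel-reich/ubiquitous-fiesta | Cp3JRpooAqfA4kGkv_11.py | node_type
-- ===== SOURCE A (Python) =====
-- def node_type(_N, _P, n):
--   all = [x for x in _N]
--   if n not in all:
--     return 'Not exist'
--   else:
--     for i in _P:
--       all.append(i)
--     for i in all:
--       if ((i == n) and(i in _N) and(i not in _P)):
--         return 'Leaf'
--       if (i == n) and(_P[_N.index(i)] == -1):
--         return 'Root'
--       if (i == n) and(i in _P) and (i in _N) and (_P[_N.index(i)] != -1):
--         return 'Inner'
-- ===== SOURCE B (Python) =====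
-- def node_type(_N, _P, n):
--     if n not in _N:
--         return 'Not exist'
--     if n not in _P:
--         return 'Leaf'
--     return 'Root' if _P[_N.index(n)] == -1 else 'Inner'
-- ===== Notes on version B (the rewrite author's own statement) =====
-- stated objective: simpler
-- what changed: Replaces A's list copy, dead parent-append loop and linear scan over _N+_P with a flat early-return guard chain that classifies n directly.
import Mathlib
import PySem

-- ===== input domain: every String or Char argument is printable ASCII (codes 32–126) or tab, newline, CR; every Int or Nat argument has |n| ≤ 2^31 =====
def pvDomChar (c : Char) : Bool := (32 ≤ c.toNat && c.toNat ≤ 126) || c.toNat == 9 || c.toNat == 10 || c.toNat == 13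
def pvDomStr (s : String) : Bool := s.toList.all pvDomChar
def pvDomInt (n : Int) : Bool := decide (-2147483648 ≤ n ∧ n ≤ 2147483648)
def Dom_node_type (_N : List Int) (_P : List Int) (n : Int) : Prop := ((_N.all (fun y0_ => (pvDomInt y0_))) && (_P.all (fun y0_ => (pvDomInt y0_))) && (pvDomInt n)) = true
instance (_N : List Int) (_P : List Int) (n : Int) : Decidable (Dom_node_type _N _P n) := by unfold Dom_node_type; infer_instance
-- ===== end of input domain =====

-- B replaces A's list copy, dead parent-append loop and linear scan by a flat guard chain (objective: simpler).

-- ===== PORT A =====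
-- the 'for i in all' loop of A; none = fell off the loop (returns None) or IndexError from _P[_N.index(i)]
def pvLoopA (_N : List Int) (_P : List Int) (n : Int) : List Int → Option String
  | [] => none
  | i :: rest =>
    if i = n ∧ i ∈ _N ∧ i ∉ _P then some "Leaf"
    else if i = n then
      match PySem.List.index? _N i with
      | none => none  -- ValueError from _N.index(i)
      | some idx =>
        match PySem.List.pyGet? _P (Int.ofNat idx) with
        | none => none  -- IndexError from _P[_N.index(i)]
        | some p =>
          if p = -1 then some "Root"
          else if i ∈ _P ∧ i ∈ _N ∧ p ≠ -1 then some "Inner"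
          else pvLoopA _N _P n rest
    else pvLoopA _N _P n rest

def node_type (_N : List Int) (_P : List Int) (n : Int) : Option String :=
  let all := _N.map (fun x => x)
  if n ∉ all then some "Not exist"
  else pvLoopA _N _P n (all ++ _P)

-- ===== PORT B =====
def node_type_alt (_N : List Int) (_P : List Int) (n : Int) : Option String :=
  if n ∉ _N then some "Not exist"
  else if n ∉ _P then some "Leaf"
  else
    match PySem.List.index? _N n with
    | none => none  -- ValueError (unreachable: n ∈ _N)
    | some idx =>
      match PySem.List.pyGet? _P (Int.ofNat idx) with
      | none => none  -- IndexError from _P[_N.index(n)]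
      | some p => some (if p = -1 then "Root" else "Inner")

-- ===== PRECONDITION & SPEC =====
-- Pre_ excludes exactly the inputs where both Pythons raise IndexError:
-- n present in both lists but _N.index(n) out of range for _P.
def Pre_node_type (_N : List Int) (_P : List Int) (n : Int) : Prop :=
  n ∈ _N → n ∈ _P → _N.idxOf n < _P.length
instance (_N : List Int) (_P : List Int) (n : Int) : Decidable (Pre_node_type _N _P n) := by
  unfold Pre_node_type; infer_instance

def pvWitness_node_type : List Int × List Int × Int := ([1, 2], [-1, 1], 1)

def Spec_node_type (_N : List Int) (_P : List Int) (n : Int) (out : Option String) : Prop := out = node_type_alt _N _P n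
instance (_N : List Int) (_P : List Int) (n : Int) (out : Option String) : Decidable (Spec_node_type _N _P n out) := by unfold Spec_node_type; infer_instance

-- ===== CLAIM (what is proved, stated in full; the proofs are below) =====
def Claim_equal_node_type : Prop := ∀ (_N : List Int) (_P : List Int) (n : Int), Dom_node_type _N _P n → Pre_node_type _N _P n → Spec_node_type _N _P n (node_type _N _P n)

-- ===== LEMMAS AND PROOFS =====

theorem idxOf?_mem (l : List Int) (n : Int) (h : n ∈ l) : l.idxOf? n = some (l.idxOf n) := by
  induction l with
  | nil => cases h
  | cons a t ih =>
    by_cases ha : a = n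
    · simp [List.idxOf?_cons, ha]
    · have h' : n ∈ t := by
        rcases List.mem_cons.mp h with h1 | h1
        · exact absurd h1.symm ha
        · exact h1
      simp [List.idxOf?_cons, ha, ih h', Ne.symm]

-- the loop skips every i ≠ n; at the first i = n it decides fully (given the index is in range)
theorem pvLoopA_decides (_N _P : List Int) (n : Int) (hN : n ∈ _N)
    (hidx : n ∈ _P → _N.idxOf n < _P.length) :
    ∀ xs : List Int, n ∈ xs →
      pvLoopA _N _P n xs =
        (if n ∉ _P then some "Leaf"
         else
           match PySem.List.index? _N n with
           | none => none
           | some idx =>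
             match PySem.List.pyGet? _P (Int.ofNat idx) with
             | none => none
             | some p => some (if p = -1 then "Root" else "Inner")) := by
  intro xs hxs
  induction xs with
  | nil => cases hxs
  | cons i rest ih =>
    by_cases hin : i = n
    · subst hin
      by_cases hP : i ∈ _P
      · have hidxN : PySem.List.index? _N i = some (_N.idxOf i) := by
          rw [PySem.List.index?_eq_idxOf?, idxOf?_mem _N i hN]
        have hlt : _N.idxOf i < _P.length := hidx hP
        have hget : PySem.List.pyGet? _P (Int.ofNat (_N.idxOf i)) = some (_P[_N.idxOf i]'hlt) := by
          have := PySem.List.pyGet?_natCast (xs := _P) (n := _N.idxOf i)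
          rw [show (Int.ofNat (_N.idxOf i)) = ((_N.idxOf i : Nat) : Int) from rfl, this,
            List.getElem?_eq_getElem hlt]
        simp only [pvLoopA, hidxN, hget]
        by_cases hroot : _P[_N.idxOf i]'hlt = -1
        · simp [hroot, hP, hN]
        · simp [hroot, hP, hN]
      · simp [pvLoopA, hN, hP]
    · have hrest : n ∈ rest := by
        rcases List.mem_cons.mp hxs with h1 | h1
        · exact absurd h1 (Ne.symm hin)
        · exact h1
      have h1 : ¬ (i = n ∧ i ∈ _N ∧ i ∉ _P) := by tauto
      simp only [pvLoopA, if_neg h1, if_neg hin]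
      exact ih hrest

-- ===== VERDICT (by name: the statement is the Claim_ definition above) =====
theorem node_type_spec : Claim_equal_node_type := by
  intro _N _P n _hdom hpre
  unfold Spec_node_type node_type node_type_alt
  simp only [List.map_id_fun', id]
  by_cases hN : n ∈ _N
  · have hmemapp : n ∈ _N ++ _P := by simp [hN]
    rw [if_neg (by simpa using hN), pvLoopA_decides _N _P n hN (fun hP => hpre hN hP) _ hmemapp]
    by_cases hP : n ∈ _P
    · simp [hN, hP]
    · simp [hN, hP]
  · simp [hN]
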